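-- pv_equiv track=rewrite | github.com/ndaly111/PolymarketAlerts | kalshi_sports_value.py | _sport_words_from_sport_keys
-- ===== SOURCE A (Python) =====
-- from typing import Any, Dict, Iterable, List, Optional, Tuple
--
-- def _sport_words_from_sport_keys(sport_keys: List[str]) -> List[str]:
--     """Fallback sport-level tokens to help pick the right Kalshi series."""
--     sk = set((k or "").strip().lower() for k in sport_keys or [])
--     toks: List[str] = []
--     if any(k.startswith("americanfootball_") for k in sk):
--         toks.append("FOOTBALL")
--     if any(k.startswith("basketball_") for k in sk):
--         toks.append("BASKETBALL")
--     if any(k.startswith("baseball_") for k in sk):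
--         toks.append("BASEBALL")
--     if any(k.startswith("icehockey_") for k in sk):
--         toks.append("HOCKEY")
--     if any("ncaaf" in k or "ncaab" in k for k in sk):
--         toks.append("COLLEGE")
--
--     out: List[str] = []
--     seen: set[str] = set()
--     for t in toks:
--         tt = str(t).upper().strip()
--         if not tt or tt in seen:
--             continue
--         seen.add(tt)
--         out.append(tt)
--     return out
-- ===== SOURCE B (Python) =====
-- def _sport_words_from_sport_keys(sport_keys):
--     """Single pass over the keys accumulating five flags, then emit in canonical order."""
--     f = bk = bs = h = c = False
--     for k in (sport_keys or []):
--         n = (k or "").strip().lower()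
--         f = f or n.startswith("americanfootball_")
--         bk = bk or n.startswith("basketball_")
--         bs = bs or n.startswith("baseball_")
--         h = h or n.startswith("icehockey_")
--         c = c or ("ncaaf" in n or "ncaab" in n)
--     out = []
--     if f:
--         out.append("FOOTBALL")
--     if bk:
--         out.append("BASKETBALL")
--     if bs:
--         out.append("BASEBALL")
--     if h:
--         out.append("HOCKEY")
--     if c:
--         out.append("COLLEGE")
--     return out
-- ===== Notes on version B (the rewrite author's own statement) =====
-- stated objective: simpler
-- what changed: B replaces A's set construction, five separate any()-scans and the uppercase/dedup output loop by one pass over the keys accumulating five boolean flags, then emits the tokens directly in canonical order.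
import Mathlib
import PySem

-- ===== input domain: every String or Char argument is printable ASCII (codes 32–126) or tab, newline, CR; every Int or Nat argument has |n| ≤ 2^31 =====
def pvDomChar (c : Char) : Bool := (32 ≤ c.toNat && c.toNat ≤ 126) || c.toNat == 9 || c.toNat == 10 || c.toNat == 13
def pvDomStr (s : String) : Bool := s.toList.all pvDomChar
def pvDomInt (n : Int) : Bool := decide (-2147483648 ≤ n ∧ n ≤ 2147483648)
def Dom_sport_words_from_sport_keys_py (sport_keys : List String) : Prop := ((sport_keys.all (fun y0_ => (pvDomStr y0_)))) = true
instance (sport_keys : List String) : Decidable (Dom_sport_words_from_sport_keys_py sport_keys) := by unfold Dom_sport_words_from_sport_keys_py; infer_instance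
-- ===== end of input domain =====

-- B replaces A's set-building, five any()-scans and dedup output loop by one flag-accumulating pass, then emits tokens in canonical order (objective: simpler).


-- ===== PORT A =====
-- '(k or "")' on a string is the string itself ('' stays ''), and 'sport_keys or []' is sport_keys itself for a list, so both are ported as the identity.
def pvNormA (k : String) : String := PySem.Str.lower (PySem.Str.strip k)

def sport_words_from_sport_keys_py (sport_keys : List String) : List String :=
  let sk : PySem.Set String := PySem.Set.ofList (sport_keys.map pvNormA)
  let toks : List String := []
  let toks := if sk.any (fun k => PySem.Str.startswith k "americanfootball_") then toks ++ ["FOOTBALL"] else toks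
  let toks := if sk.any (fun k => PySem.Str.startswith k "basketball_") then toks ++ ["BASKETBALL"] else toks
  let toks := if sk.any (fun k => PySem.Str.startswith k "baseball_") then toks ++ ["BASEBALL"] else toks
  let toks := if sk.any (fun k => PySem.Str.startswith k "icehockey_") then toks ++ ["HOCKEY"] else toks
  let toks := if sk.any (fun k => PySem.Str.isIn "ncaaf" k || PySem.Str.isIn "ncaab" k) then toks ++ ["COLLEGE"] else toks
  let r := toks.foldl (fun (st : List String × PySem.Set String) t =>
      let tt := PySem.Str.strip (PySem.Str.upper t)
      if tt = "" || PySem.Set.contains st.2 tt then st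
      else (st.1 ++ [tt], PySem.Set.add st.2 tt)) ([], PySem.Set.empty)
  r.1

-- ===== PORT B =====
def pvFlags := Bool × Bool × Bool × Bool × Bool

def pvStepB (fl : pvFlags) (k : String) : pvFlags :=
  let n := PySem.Str.lower (PySem.Str.strip k)
  (fl.1 || PySem.Str.startswith n "americanfootball_",
   fl.2.1 || PySem.Str.startswith n "basketball_",
   fl.2.2.1 || PySem.Str.startswith n "baseball_",
   fl.2.2.2.1 || PySem.Str.startswith n "icehockey_",
   fl.2.2.2.2 || (PySem.Str.isIn "ncaaf" n || PySem.Str.isIn "ncaab" n))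

def sport_words_from_sport_keys_py_alt (sport_keys : List String) : List String :=
  let fl := sport_keys.foldl pvStepB (false, false, false, false, false)
  (if fl.1 then ["FOOTBALL"] else []) ++
  (if fl.2.1 then ["BASKETBALL"] else []) ++
  (if fl.2.2.1 then ["BASEBALL"] else []) ++
  (if fl.2.2.2.1 then ["HOCKEY"] else []) ++
  (if fl.2.2.2.2 then ["COLLEGE"] else [])

-- ===== PRECONDITION & SPEC =====
def Spec_sport_words_from_sport_keys_py (sport_keys : List String) (out : List String) : Prop := out = sport_words_from_sport_keys_py_alt sport_keys
instance (sport_keys : List String) (out : List String) : Decidable (Spec_sport_words_from_sport_keys_py sport_keys out) := by unfold Spec_sport_words_from_sport_keys_py; infer_instance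

-- ===== CLAIM (what is proved, stated in full; the proofs are below) =====
def Claim_equal_sport_words_from_sport_keys_py : Prop := ∀ (sport_keys : List String), Dom_sport_words_from_sport_keys_py sport_keys → Spec_sport_words_from_sport_keys_py sport_keys (sport_words_from_sport_keys_py sport_keys)

-- ===== LEMMAS AND PROOFS =====

-- any over set(xs) equals any over xs (existential, order-insensitive)
theorem pv_set_any (xs : List String) (p : String → Bool) :
    (PySem.Set.ofList xs).any p = xs.any p := by
  apply Bool.eq_iff_iff.mpr
  simp [List.any_eq_true, PySem.Set.mem_ofList]

-- B's flag fold computes the five existential scans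
theorem pv_fold_flags (xs : List String) (fl : pvFlags) :
    xs.foldl pvStepB fl =
      (fl.1 || xs.any (fun k => PySem.Str.startswith (pvNormA k) "americanfootball_"),
       fl.2.1 || xs.any (fun k => PySem.Str.startswith (pvNormA k) "basketball_"),
       fl.2.2.1 || xs.any (fun k => PySem.Str.startswith (pvNormA k) "baseball_"),
       fl.2.2.2.1 || xs.any (fun k => PySem.Str.startswith (pvNormA k) "icehockey_"),
       fl.2.2.2.2 || xs.any (fun k => PySem.Str.isIn "ncaaf" (pvNormA k) || PySem.Str.isIn "ncaab" (pvNormA k))) := by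
  induction xs generalizing fl with
  | nil => simp
  | cons x xs ih =>
    simp only [List.foldl_cons, ih, List.any_cons]
    simp [pvStepB, pvNormA, Bool.or_assoc]

-- ===== VERDICT (by name: the statement is the Claim_ definition above) =====
theorem sport_words_from_sport_keys_py_spec : Claim_equal_sport_words_from_sport_keys_py := by
  intro xs _
  show sport_words_from_sport_keys_py xs = sport_words_from_sport_keys_py_alt xs
  unfold sport_words_from_sport_keys_py sport_words_from_sport_keys_py_alt
  simp only [pv_set_any, List.any_map, Function.comp_def, pv_fold_flags]
  generalize (xs.any (fun k => PySem.Str.startswith (pvNormA k) "americanfootball_")) = b1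
  generalize (xs.any (fun k => PySem.Str.startswith (pvNormA k) "basketball_")) = b2
  generalize (xs.any (fun k => PySem.Str.startswith (pvNormA k) "baseball_")) = b3
  generalize (xs.any (fun k => PySem.Str.startswith (pvNormA k) "icehockey_")) = b4
  generalize (xs.any (fun k => PySem.Str.isIn "ncaaf" (pvNormA k) || PySem.Str.isIn "ncaab" (pvNormA k))) = b5
  cases b1 <;> cases b2 <;> cases b3 <;> cases b4 <;> cases b5 <;> decide
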